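-- pv_equiv track=rewrite | github.com/jiaqigeng/CMU-16824-Vision-Learning-and-Recognition | hw3/vqa_dataset.py | _create_id_map
-- ===== SOURCE A (Python) =====
-- def _create_id_map(word_list, max_list_length):
--     """
--     Find the most common str in a list, then create a map from str to id (its rank in the frequency)
--     Args:
--         word_list: a list of str, where the most frequent elements are picked out
--         max_list_length: the number of strs picked
--     Return:
--         A map (dict) from str to id (rank)
--     """
--     ############ 1.5 TODO
--     word_count_map = {}
--     id_map = {}
--
--     for word in word_list:
--         if word in word_count_map:
--             word_count_map[word] += 1
--         else:
--             word_count_map[word] = 1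
--
--     word_count_sorted = sorted(word_count_map, key=word_count_map.get, reverse=True)
--     word_selected = word_count_sorted[:max_list_length]
--
--     for id, word in enumerate(word_selected):
--         id_map[word] = id
--
--     return id_map
-- ===== SOURCE B (Python) =====
-- def _create_id_map(word_list, max_list_length):
--     # Bucket (counting) sort by frequency instead of a comparison sort;
--     # ties stay in first-seen order because buckets are filled in dict order.
--     counts = {}
--     for w in word_list:
--         counts[w] = counts.get(w, 0) + 1
--     buckets = {}
--     for w, c in counts.items():
--         buckets.setdefault(c, []).append(w)
--     ranked = []
--     if counts:
--         for f in range(max(counts.values()), 0, -1):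
--             ranked.extend(buckets.get(f, []))
--     return {w: i for i, w in enumerate(ranked[:max_list_length])}
-- ===== Notes on version B (the rewrite author's own statement) =====
-- stated objective: alternative
-- what changed: Replaces the comparison sort (sorted with key=count, reverse=True) by a counting/bucket sort: frequencies are bucketed once and buckets are emitted from the maximum frequency down to 1, which reproduces the stable first-seen tie order.
import Mathlib
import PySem

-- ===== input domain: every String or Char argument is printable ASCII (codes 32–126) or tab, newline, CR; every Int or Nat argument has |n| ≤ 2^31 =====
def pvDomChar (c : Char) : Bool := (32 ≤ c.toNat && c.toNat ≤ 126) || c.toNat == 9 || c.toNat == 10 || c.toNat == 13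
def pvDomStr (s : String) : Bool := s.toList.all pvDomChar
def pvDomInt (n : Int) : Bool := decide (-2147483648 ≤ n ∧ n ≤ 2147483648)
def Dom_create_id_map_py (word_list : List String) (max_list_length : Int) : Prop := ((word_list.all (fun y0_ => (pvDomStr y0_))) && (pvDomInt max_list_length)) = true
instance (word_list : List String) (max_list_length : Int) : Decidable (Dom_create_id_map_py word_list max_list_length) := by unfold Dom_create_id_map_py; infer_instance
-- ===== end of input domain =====

-- B replaces A's comparison sort by frequency with a counting/bucket sort (buckets emitted from
-- the maximum frequency down to 1), reproducing the stable first-seen tie order; same result.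

-- ===== PORT A =====
-- key=word_count_map.get is ported as getD w 0: every word sorted is a key of the dict, so
-- Python's .get always returns its count there.
def create_id_map_py (word_list : List String) (max_list_length : Int) : List (String × Int) :=
  let word_count_map : PySem.Dict String Int :=
    word_list.foldl
      (fun d word =>
        if d.contains word then d.insert word (d.getD word 0 + 1) else d.insert word 1)
      PySem.Dict.empty
  let word_count_sorted :=
    PySem.List.sorted word_count_map.keys (fun w => word_count_map.getD w 0) true
  let word_selected := PySem.List.slice word_count_sorted none (some max_list_length)
  let id_map : PySem.Dict String Int :=
    (PySem.List.enumerate word_selected).foldl (fun d p => d.insert p.2 p.1) PySem.Dict.empty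
  id_map.items

-- ===== PORT B =====
-- Python's guard 'if counts:' appears as the 'none' branch of max?: max? of the values is none
-- exactly when the dict is empty.
def create_id_map_py_alt (word_list : List String) (max_list_length : Int) : List (String × Int) :=
  let counts : PySem.Dict String Int :=
    word_list.foldl (fun d w => d.insert w (d.getD w 0 + 1)) PySem.Dict.empty
  let buckets : PySem.Dict Int (List String) :=
    counts.items.foldl (fun b p => b.modify p.2 [] (fun l => l ++ [p.1])) PySem.Dict.empty
  let ranked : List String :=
    match PySem.List.max? counts.values (fun v => v) with
    | none => []
    | some top =>
        (PySem.List.pyRange top 0 (-1)).foldl (fun acc f => acc ++ buckets.getD f []) []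
  ((PySem.List.enumerate (PySem.List.slice ranked none (some max_list_length))).foldl
      (fun d p => d.insert p.2 p.1) PySem.Dict.empty).items

-- ===== PRECONDITION & SPEC =====
def Spec_create_id_map_py (word_list : List String) (max_list_length : Int) (out : List (String × Int)) : Prop := out = create_id_map_py_alt word_list max_list_length
instance (word_list : List String) (max_list_length : Int) (out : List (String × Int)) : Decidable (Spec_create_id_map_py word_list max_list_length out) := by unfold Spec_create_id_map_py; infer_instance

-- ===== CLAIM (what is proved, stated in full; the proofs are below) =====
def Claim_equal_create_id_map_py : Prop := ∀ (word_list : List String) (max_list_length : Int), Dom_create_id_map_py word_list max_list_length → Spec_create_id_map_py word_list max_list_length (create_id_map_py word_list max_list_length)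

-- ===== LEMMAS AND PROOFS =====

theorem pv_getD_zero_of_not_contains (d : PySem.Dict String Int) (w : String)
    (h : d.contains w = false) : d.getD w 0 = 0 := by
  unfold PySem.Dict.getD PySem.Dict.get?
  unfold PySem.Dict.contains at h
  rw [List.find?_eq_none.mpr]
  · rfl
  · intro p hp
    have := List.any_eq_false.mp h p hp
    simp_all

-- A's count loop ('if word in d: d[word] += 1 else: d[word] = 1') computes Counter(word_list).
theorem pv_countA_eq_counter (ws : List String) :
    ws.foldl
      (fun d word =>
        if d.contains word then d.insert word (d.getD word 0 + 1) else d.insert word 1)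
      PySem.Dict.empty = PySem.Dict.counter ws := by
  rw [PySem.Dict.counter_eq_foldl]
  have hstep : (fun (d : PySem.Dict String Int) word =>
      if d.contains word then d.insert word (d.getD word 0 + 1) else d.insert word 1)
      = fun d x => d.modify x 0 (fun y => y + 1) := by
    funext d w
    unfold PySem.Dict.modify
    by_cases h : d.contains w = true
    · simp [h]
    · have h' : d.contains w = false := by simpa using h
      rw [pv_getD_zero_of_not_contains d w h']
      simp [h']
  rw [hstep]

-- insertBy walks past a prefix it is not inserted into.
theorem pv_insertBy_append_left (before : String → String → Bool) (x : String)
    (l r : List String) (h : ∀ y ∈ l, before x y = false) :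
    PySem.List.insertBy before x (l ++ r) = l ++ PySem.List.insertBy before x r := by
  induction l with
  | nil => simp
  | cons a l ih =>
      have ha : before x a = false := h a (by simp)
      simp [PySem.List.insertBy, ha, ih (fun y hy => h y (by simp [hy]))]

-- insertBy goes in front when it precedes every element (only the head matters).
theorem pv_insertBy_front (before : String → String → Bool) (x : String)
    (r : List String) (h : ∀ y ∈ r, before x y = true) :
    PySem.List.insertBy before x r = x :: r := by
  cases r with
  | nil => rfl
  | cons a r => simp [PySem.List.insertBy, h a (by simp)]

-- one insertion step preserves the bucket decomposition
theorem pv_insert_step (key : String → Int) (x : String) :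
    ∀ (vs : List Int) (xs : List String), vs.Pairwise (· > ·) → key x ∈ vs →
    PySem.List.insertBy (fun a b => decide (key b < key a)) x
        (vs.flatMap (fun v => xs.filter (fun y => decide (key y = v))))
      = vs.flatMap (fun v => (xs ++ [x]).filter (fun y => decide (key y = v))) := by
  intro vs
  induction vs with
  | nil => intro xs _ hx; simp at hx
  | cons v vs ih =>
      intro xs hp hx
      have hlt : ∀ v' ∈ vs, v' < v := fun v' hv' => (List.pairwise_cons.mp hp).1 v' hv'
      have hp' : vs.Pairwise (· > ·) := (List.pairwise_cons.mp hp).2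
      have hmem_rest : ∀ y ∈ vs.flatMap (fun v => xs.filter (fun y => decide (key y = v))),
          key y < v := by
        intro y hy
        obtain ⟨v', hv', hyf⟩ := List.mem_flatMap.mp hy
        have : key y = v' := by simpa using (List.mem_filter.mp hyf).2
        exact this ▸ hlt v' hv'
      by_cases hxv : key x = v
      · -- x lands at the end of the head bucket
        rw [List.flatMap_cons, List.flatMap_cons,
          pv_insertBy_append_left _ _ _ _ (by
            intro y hy
            have : key y = v := by simpa using (List.mem_filter.mp hy).2
            simp [this, hxv]),
          pv_insertBy_front _ _ _ (by
            intro y hy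
            simpa [hxv] using hmem_rest y hy)]
        have htail : vs.flatMap (fun v => (xs ++ [x]).filter (fun y => decide (key y = v)))
            = vs.flatMap (fun v => xs.filter (fun y => decide (key y = v))) := by
          apply List.flatMap_congr
          intro v' hv'
          have hne : key x ≠ v' := by
            have := hlt v' hv'
            omega
          simp [List.filter_append, hne]
        have hhead : (xs ++ [x]).filter (fun y => decide (key y = v))
            = xs.filter (fun y => decide (key y = v)) ++ [x] := by
          simp [List.filter_append, hxv]
        rw [htail, hhead]
        simp
      · -- x belongs to a later bucket
        have hx' : key x ∈ vs := by
          rcases List.mem_cons.mp hx with h | h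
          · exact absurd h hxv
          · exact h
        have hxlt : key x < v := hlt _ hx'
        rw [List.flatMap_cons, List.flatMap_cons,
          pv_insertBy_append_left _ _ _ _ (by
            intro y hy
            have hyv : key y = v := by simpa using (List.mem_filter.mp hy).2
            simp only [decide_eq_false_iff_not, not_lt, hyv]
            omega),
          ih xs hp' hx']
        have hhead : (xs ++ [x]).filter (fun y => decide (key y = v))
            = xs.filter (fun y => decide (key y = v)) := by
          simp [List.filter_append, hxv]
        rw [hhead]

-- the stable reverse sort by key is the concatenation of the key-buckets, keys strictly
-- descending, each bucket in original order
theorem pv_sorted_eq_flatMap (key : String → Int) (vs : List Int) :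
    ∀ (xs : List String), vs.Pairwise (· > ·) → (∀ x ∈ xs, key x ∈ vs) →
    PySem.List.sorted xs key true
      = vs.flatMap (fun v => xs.filter (fun y => decide (key y = v))) := by
  intro xs
  induction xs using List.reverseRecOn with
  | nil => intro _ _; simp [PySem.List.sorted]
  | append_singleton xs x ih =>
      intro hp hmem
      rw [PySem.List.sorted_rev_eq_foldl_insertBy, List.foldl_append, List.foldl_cons,
        List.foldl_nil, ← PySem.List.sorted_rev_eq_foldl_insertBy,
        ih hp (fun y hy => hmem y (by simp [hy])),
        pv_insert_step key x vs xs hp (hmem x (by simp))]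

-- the bucket dict: bucket f collects, in order, the first components of the pairs whose
-- second component is f
theorem pv_bucket_getD (ps : List (String × Int)) :
    ∀ (d : PySem.Dict Int (List String)) (f : Int),
    (ps.foldl (fun b p => b.modify p.2 [] (fun l => l ++ [p.1])) d).getD f []
      = d.getD f [] ++ (ps.filter (fun p => decide (p.2 = f))).map Prod.fst := by
  induction ps with
  | nil => intro d f; simp
  | cons p ps ih =>
      intro d f
      rw [List.foldl_cons, ih]
      unfold PySem.Dict.modify
      rw [PySem.Dict.getD_insert]
      by_cases h : p.2 = f
      · simp [h.symm]
      · have : ¬ f = p.2 := fun hh => h hh.symm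
        simp [this, h]

-- B's count loop is Counter(word_list) too (its step is literally dict.modify's definition)
theorem pv_countB_eq_counter (ws : List String) :
    ws.foldl (fun d w => d.insert w (d.getD w 0 + 1)) PySem.Dict.empty
      = PySem.Dict.counter ws := by
  rw [PySem.Dict.counter_eq_foldl]; rfl

-- the core equality: A's stable reverse sort of the keys by count equals B's bucket emission
theorem pv_core (ws : List String) :
    PySem.List.sorted (PySem.Dict.counter ws).keys
        (fun w => (PySem.Dict.counter ws).getD w 0) true =
      (match PySem.List.max? (PySem.Dict.counter ws).values (fun v => v) with
       | none => []
       | some top =>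
           (PySem.List.pyRange top 0 (-1)).foldl
             (fun acc f =>
               acc ++ ((PySem.Dict.counter ws).items.foldl
                   (fun b p => b.modify p.2 [] (fun l => l ++ [p.1]))
                   PySem.Dict.empty).getD f [])
             []) := by
  have hkeys := PySem.Dict.keys_counter ws
  have hkey : (fun w => (PySem.Dict.counter ws).getD w 0)
      = fun w => ((ws.count w : Int)) := funext fun w => PySem.Dict.getD_counter ws w
  have hvals : (PySem.Dict.counter ws).values
      = (PySem.Set.ofList ws).map (fun k => ((ws.count k : Int))) := by
    show ((PySem.Dict.counter ws).items).map Prod.snd = _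
    rw [PySem.Dict.items_counter, List.map_map]
    rfl
  have hbucket : ∀ f : Int,
      ((PySem.Dict.counter ws).items.foldl
          (fun b p => b.modify p.2 [] (fun l => l ++ [p.1])) PySem.Dict.empty).getD f []
        = (PySem.Set.ofList ws).filter (fun y => decide (((ws.count y : Int)) = f)) := by
    intro f
    rw [pv_bucket_getD, PySem.Dict.items_counter]
    have : PySem.Dict.empty.getD f ([] : List String) = [] := rfl
    rw [this, List.filter_map, List.map_map]
    simp [Function.comp_def]
  cases hmax : PySem.List.max? (PySem.Dict.counter ws).values (fun v => v) with
  | none =>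
      have hnil : (PySem.Dict.counter ws).values = [] :=
        (PySem.List.max?_eq_none_iff _ _).mp hmax
      have hset : PySem.Set.ofList ws = [] := by
        rw [hvals] at hnil
        exact List.map_eq_nil_iff.mp hnil
      rw [hkeys, hset]
      simp [PySem.List.sorted]
  | some top =>
      have hcov : ∀ w ∈ PySem.Set.ofList ws,
          ((ws.count w : Int)) ∈ PySem.List.pyRange top 0 (-1) := by
        intro w hw
        rw [PySem.List.mem_pyRange_neg_one]
        constructor
        · have hmem : w ∈ ws := (PySem.Set.mem_ofList ws w).mp hw
          have := List.count_pos_iff.mpr hmem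
          exact_mod_cast this
        · have hmemv : ((ws.count w : Int)) ∈ (PySem.Dict.counter ws).values := by
            rw [hvals]
            exact List.mem_map.mpr ⟨w, hw, rfl⟩
          simpa using PySem.List.max?_isMax hmax _ hmemv
      have hgoal : PySem.List.sorted (PySem.Set.ofList ws)
          (fun w => ((ws.count w : Int))) true
          = (PySem.List.pyRange top 0 (-1)).foldl
              (fun acc f =>
                acc ++ ((PySem.Dict.counter ws).items.foldl
                    (fun b p => b.modify p.2 [] (fun l => l ++ [p.1]))
                    PySem.Dict.empty).getD f [])
              [] := by
        rw [pv_sorted_eq_flatMap (fun w => ((ws.count w : Int)))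
            (PySem.List.pyRange top 0 (-1)) (PySem.Set.ofList ws)
            (by
              rw [PySem.List.pyRange_neg_one_eq_reverse, List.pairwise_reverse]
              simpa using PySem.List.pairwise_lt_pyRange_one (0 + 1) (top + 1))
            hcov,
          PySem.List.foldl_append_eq_flatMap, List.nil_append]
        exact List.flatMap_congr fun f _ => (hbucket f).symm
      rw [hkeys, hkey]
      exact hgoal

-- ===== VERDICT (by name: the statement is the Claim_ definition above) =====
theorem create_id_map_py_spec : Claim_equal_create_id_map_py := by
  intro ws m _
  unfold Spec_create_id_map_py
  simp only [create_id_map_py, create_id_map_py_alt]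
  rw [pv_countA_eq_counter, pv_countB_eq_counter, pv_core]
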